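-- pv_equiv track=rewrite | github.com/lucasdietrich/zephyr-caniot-controller | scripts/zephyr_conf_parser.py | gather_configurations
-- ===== SOURCE A (Python) =====
-- from typing import Dict, List, Tuple, Any, OrderedDict, Set
-- from collections import OrderedDict
--
-- def gather_configurations(configurations: Dict) -> OrderedDict:
--     configs = OrderedDict()
--
--     for board, config in configurations.items():
--         for option, value in config.items():
--             if option not in configs:
--                 configs[option] = []
--             configs[option].append((board, value))
--
--     return dict(sorted(configs.items()))
-- ===== SOURCE B (Python) =====
-- def gather_configurations(configurations):
--     triples = [(option, board, value)
--                for board, config in configurations.items()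
--                for option, value in config.items()]
--     triples.sort(key=lambda t: t[0])
--     out = []
--     for option, board, value in triples:
--         if out and out[-1][0] == option:
--             out[-1] = (option, out[-1][1] + [(board, value)])
--         else:
--             out.append((option, [(board, value)]))
--     return dict(out)
-- ===== Notes on version B (the rewrite author's own statement) =====
-- stated objective: alternative
-- what changed: B replaces A's dict-of-lists grouping (membership test + insert-empty + append per entry, then sort the finished items) by a sort-then-sweep: it flattens the input to (option, board, value) triples, stable-sorts them by the option name alone, and groups adjacent equal-option runs in one linear pass with no lookup structure during grouping.
import Mathlib
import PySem

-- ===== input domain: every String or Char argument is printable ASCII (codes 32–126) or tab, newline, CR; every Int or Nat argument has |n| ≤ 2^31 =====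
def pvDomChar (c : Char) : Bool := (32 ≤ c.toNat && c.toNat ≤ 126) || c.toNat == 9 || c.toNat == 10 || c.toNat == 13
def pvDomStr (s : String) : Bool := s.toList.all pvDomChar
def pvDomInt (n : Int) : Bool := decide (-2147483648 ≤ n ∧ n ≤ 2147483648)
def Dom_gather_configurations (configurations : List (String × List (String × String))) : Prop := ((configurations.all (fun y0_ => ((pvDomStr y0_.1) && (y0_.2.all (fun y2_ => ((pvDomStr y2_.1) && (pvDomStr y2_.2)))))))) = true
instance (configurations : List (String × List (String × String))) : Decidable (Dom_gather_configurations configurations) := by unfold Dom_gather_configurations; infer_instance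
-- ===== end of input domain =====

-- B replaces A's dict-of-lists grouping (membership test + insert-empty + append per entry,
-- then sort the finished items) by a sort-then-sweep: flatten to (option, board, value)
-- triples, stable-sort them by option alone, then group adjacent equal-option runs in one
-- linear sweep (objective: alternative algorithm, no speed claim).

-- ===== PORT A =====
-- Python's sorted(configs.items()) compares (option, list) tuples; dict keys are distinct,
-- so the comparison is decided by the option alone — ported as a sort keyed on the first component.
def gather_configurations (configurations : List (String × List (String × String))) : List (String × List (String × String)) :=
  let configs : PySem.Dict String (List (String × String)) :=
    configurations.foldl (fun configs bc =>
      bc.2.foldl (fun configs ov =>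
        let configs := if configs.contains ov.1 then configs else configs.insert ov.1 []
        configs.modify ov.1 [] (fun l => l ++ [(bc.1, ov.2)])) configs)
      PySem.Dict.empty
  PySem.List.sorted configs.items (fun p => p.1)

-- ===== PORT B =====
def pvTriples (configurations : List (String × List (String × String))) : List (String × String × String) :=
  configurations.flatMap (fun bc => bc.2.map (fun ov => (ov.1, bc.1, ov.2)))

-- Source B's in-place 'triples.sort(key=...)' is the stable sort PySem.List.sorted;
-- 'out[-1] = (option, out[-1][1] + [(board, value)])' is dropLast ++ [updated last].
def gather_configurations_alt (configurations : List (String × List (String × String))) : List (String × List (String × String)) :=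
  let triples := PySem.List.sorted (pvTriples configurations) (fun t => t.1)
  let out : List (String × List (String × String)) :=
    triples.foldl (fun out t =>
      match out.getLast? with
      | some last =>
          if last.1 == t.1 then out.dropLast ++ [(t.1, last.2 ++ [t.2])]
          else out ++ [(t.1, [t.2])]
      | none => out ++ [(t.1, [t.2])]) []
  (PySem.Dict.ofList out).items

-- ===== PRECONDITION & SPEC =====
def Spec_gather_configurations (configurations : List (String × List (String × String))) (out : List (String × List (String × String))) : Prop := out = gather_configurations_alt configurations
instance (configurations : List (String × List (String × String))) (out : List (String × List (String × String))) : Decidable (Spec_gather_configurations configurations out) := by unfold Spec_gather_configurations; infer_instance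

-- ===== CLAIM (what is proved, stated in full; the proofs are below) =====
def Claim_equal_gather_configurations : Prop := ∀ (configurations : List (String × List (String × String))), Dom_gather_configurations configurations → Spec_gather_configurations configurations (gather_configurations configurations)

-- ===== LEMMAS AND PROOFS =====

-- The canonical group of option o drawn from a triple list ts.
def pvGroup (ts : List (String × String × String)) (o : String) : String × List (String × String) :=
  (o, (ts.filter (fun t => t.1 == o)).map (fun t => t.2))

-- B's sweep step, named for the proofs.
def pvStep (out : List (String × List (String × String))) (t : String × String × String) : List (String × List (String × String)) :=
  match out.getLast? with
  | some last =>
      if last.1 == t.1 then out.dropLast ++ [(t.1, last.2 ++ [t.2])]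
      else out ++ [(t.1, [t.2])]
  | none => out ++ [(t.1, [t.2])]

-- ---- stability of the sort: filtering one option key commutes with sorting by key ----

theorem pv_filter_insertBy (x : String × String × String) (ys : List (String × String × String)) (o : String)
    (hys : ys.Pairwise (fun a b => a.1 ≤ b.1)) :
    (PySem.List.insertBy (fun a b => decide (a.1 < b.1)) x ys).filter (fun y => y.1 == o)
      = if x.1 == o then ys.filter (fun y => y.1 == o) ++ [x] else ys.filter (fun y => y.1 == o) := by
  induction ys with
  | nil => by_cases h : x.1 == o <;> simp [PySem.List.insertBy, h]
  | cons y ys ih =>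
    have hys' : ys.Pairwise (fun a b => a.1 ≤ b.1) := hys.tail
    have hyle : ∀ z ∈ ys, y.1 ≤ z.1 := fun z hz => (List.pairwise_cons.mp hys).1 z hz
    simp only [PySem.List.insertBy]
    by_cases hlt : x.1 < y.1
    · simp only [hlt, decide_true, if_true]
      by_cases hxo : x.1 = o
      · have hnil : (y :: ys).filter (fun t => t.1 == o) = [] := by
          rw [List.filter_eq_nil_iff]
          intro z hz
          have : y.1 ≤ z.1 := by
            rcases List.mem_cons.mp hz with h | h
            · exact h ▸ le_refl _
            · exact hyle z h
          have : o < z.1 := lt_of_lt_of_le (hxo ▸ hlt) this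
          simp [ne_of_gt this]
        simp [hxo, hnil]
      · simp [List.filter_cons, hxo]
    · simp only [hlt, decide_false]
      rw [if_neg Bool.false_ne_true, List.filter_cons, ih hys', List.filter_cons]
      split_ifs <;> simp
theorem pv_foldl_insertBy_filter (xs acc : List (String × String × String)) (o : String)
    (hacc : acc.Pairwise (fun a b => a.1 ≤ b.1)) :
    (xs.foldl (fun a x => PySem.List.insertBy (fun a b => decide (a.1 < b.1)) x a) acc).filter (fun y => y.1 == o)
      = acc.filter (fun y => y.1 == o) ++ xs.filter (fun y => y.1 == o) := by
  induction xs generalizing acc with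
  | nil => simp
  | cons x xs ih =>
    rw [List.foldl_cons, ih _ (PySem.List.insertBy_pairwise_le (fun t => t.1) x acc hacc),
        pv_filter_insertBy x acc o hacc, List.filter_cons]
    split_ifs <;> simp

theorem pv_sorted_filter (ts : List (String × String × String)) (o : String) :
    (PySem.List.sorted ts (fun t => t.1)).filter (fun y => y.1 == o) = ts.filter (fun y => y.1 == o) := by
  rw [PySem.List.sorted_eq_foldl_insertBy, pv_foldl_insertBy_filter ts [] o (by simp)]
  simp

-- ---- the sweep over a key-sorted list produces one group per distinct key ----

theorem pv_ofList_sublist {α : Type} [BEq α] [LawfulBEq α] (xs : List α) :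
    (PySem.Set.ofList xs).Sublist xs := by
  induction xs using List.reverseRecOn with
  | nil => simp [PySem.Set.ofList]
  | append_singleton l x ih =>
    rw [PySem.Set.ofList_append_singleton, PySem.Set.add]
    split_ifs
    · exact ih.trans (List.sublist_append_left l [x])
    · exact List.Sublist.append ih (List.Sublist.refl [x])

theorem pv_last_ge (ks : List String) (h : ks.Pairwise (· ≤ ·)) (hne : ks ≠ []) :
    ∀ x ∈ ks, x ≤ ks.getLast hne := by
  induction ks with
  | nil => simp at hne
  | cons k ks ih =>
    intro x hx
    rcases List.mem_cons.mp hx with rfl | hx'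
    · cases ks with
      | nil => simp [List.getLast]
      | cons k' ks' =>
        have := ih h.tail (by simp) k' (by simp)
        have hk : x ≤ k' := (List.pairwise_cons.mp h).1 k' (by simp)
        simpa [List.getLast] using le_trans hk this
    · cases ks with
      | nil => simp at hx'
      | cons k' ks' => simpa [List.getLast] using ih h.tail (by simp) x hx'

theorem pv_sweep_eq (ts : List (String × String × String))
    (hts : (ts.map (fun t => t.1)).Pairwise (· ≤ ·)) :
    ts.foldl pvStep [] = (PySem.Set.ofList (ts.map (fun t => t.1))).map (pvGroup ts) := by
  induction ts using List.reverseRecOn with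
  | nil => simp [PySem.Set.ofList]
  | append_singleton l t ih =>
    have hl : (l.map (fun t => t.1)).Pairwise (· ≤ ·) := by
      have : (l.map (fun t => t.1)).Sublist ((l ++ [t]).map (fun t => t.1)) :=
        (List.sublist_append_left l [t]).map _
      exact hts.sublist this
    have hle : ∀ z ∈ l, z.1 ≤ t.1 := by
      intro z hz
      have hts' := hts
      rw [List.map_append] at hts'
      exact (List.pairwise_append.mp hts').2.2 z.1 (List.mem_map_of_mem hz) t.1 (by simp)
    -- groups of l ++ [t] restricted to keys ≠ t.1 agree with groups of l
    have hgroup_ne : ∀ o : String, o ≠ t.1 → pvGroup (l ++ [t]) o = pvGroup l o := by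
      intro o ho
      simp [pvGroup, List.filter_append, Ne.symm ho]
    have hgroup_eq : pvGroup (l ++ [t]) t.1 = (t.1, ((l.filter (fun y => y.1 == t.1)).map (fun y => y.2)) ++ [t.2]) := by
      simp [pvGroup, List.filter_append]
    rw [List.foldl_append, List.foldl_cons, List.foldl_nil, ih hl]
    set ks := PySem.Set.ofList (l.map (fun t => t.1)) with hks
    have hksnodup : ks.Nodup := PySem.Set.nodup_ofList _
    have hkspair : ks.Pairwise (· ≤ ·) := hl.sublist (pv_ofList_sublist _)
    simp only [List.map_append, List.map_cons, List.map_nil]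
    rw [PySem.Set.ofList_append_singleton, PySem.Set.add, ← hks]
    by_cases hmem : PySem.Set.contains ks t.1 = true
    · -- t.1 already a key: last group absorbs t
      rw [if_pos hmem]
      have hksne : ks ≠ [] := by
        intro h; rw [h] at hmem; simp [PySem.Set.contains] at hmem
      have hlast : ks.getLast hksne = t.1 := by
        have h1 : ks.getLast hksne ≤ t.1 := by
          have : ks.getLast hksne ∈ ks := List.getLast_mem hksne
          have : ks.getLast hksne ∈ l.map (fun t => t.1) := (PySem.Set.mem_ofList _ _).mp this
          rcases List.mem_map.mp this with ⟨z, hz, hz'⟩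
          exact hz' ▸ hle z hz
        have h2 : t.1 ≤ ks.getLast hksne := by
          apply pv_last_ge ks hkspair hksne
          simpa [PySem.Set.contains] using hmem
        exact le_antisymm h1 h2
      have hmapne : ks.map (pvGroup l) ≠ [] := by simpa using hksne
      have hlast' : (ks.map (pvGroup l)).getLast? = some (pvGroup l t.1) := by
        rw [List.getLast?_map, List.getLast?_eq_some_getLast hksne, Option.map_some, hlast]
      rw [pvStep, hlast']
      dsimp only
      have hfst : (pvGroup l t.1).1 = t.1 := rfl
      rw [hfst]
      simp only [beq_self_eq_true, if_true]
      -- both sides: dropLast groups unchanged, last group gains t.2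
      have hksdecomp : ks.dropLast ++ [t.1] = ks := by
        conv_rhs => rw [← List.dropLast_append_getLast hksne, hlast]
      have hdropne : ∀ o ∈ ks.dropLast, o ≠ t.1 := by
        intro o ho
        have hnd := hksdecomp ▸ hksnodup
        rcases List.nodup_append.mp hnd with ⟨_, _, hdisj⟩
        intro h; exact hdisj o ho t.1 (by simp) h
      conv_rhs => rw [← hksdecomp]
      rw [List.map_append, ← List.map_dropLast]
      congr 1
      · apply List.map_congr_left
        intro o ho
        exact (hgroup_ne o (hdropne o ho)).symm
      · simp [pvGroup]
    · -- t.1 a fresh key: a new group is appended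
      rw [if_neg hmem]
      have hmem' : t.1 ∈ ks → False := fun hin => hmem (by simpa [PySem.Set.contains] using hin)
      have hnotin : t.1 ∉ l.map (fun t => t.1) := fun h => hmem' ((PySem.Set.mem_ofList _ _).mpr h)
      have hfilter : l.filter (fun y => y.1 == t.1) = [] := by
        rw [List.filter_eq_nil_iff]
        intro z hz h
        exact hnotin (List.mem_map.mpr ⟨z, hz, by simpa using h⟩)
      have hstep : pvStep (ks.map (pvGroup l)) t = ks.map (pvGroup l) ++ [(t.1, [t.2])] := by
        rw [pvStep]
        cases hlast : (ks.map (pvGroup l)).getLast? with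
        | none => rfl
        | some last =>
          have hlastmem : last ∈ ks.map (pvGroup l) := List.mem_of_getLast? hlast
          rcases List.mem_map.mp hlastmem with ⟨o, ho, hgo⟩
          have : last.1 = o := by rw [← hgo]; rfl
          have hone : last.1 ≠ t.1 := by
            rw [this]; intro h
            exact hmem' (h ▸ ho)
          simp [hone]
      rw [hstep, List.map_append]
      congr 1
      · apply List.map_congr_left
        intro o ho
        have : o ≠ t.1 := fun h => hmem' (h ▸ ho)
        exact (hgroup_ne o this).symm
      · simp [pvGroup, hfilter]

-- ---- A's grouping dict, characterised ----

-- A's "if absent, insert []; then append" step is one modify-with-default-[] step.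
theorem pv_step_eq (d : PySem.Dict String (List (String × String))) (o : String)
    (f : List (String × String) → List (String × String)) :
    (let d' := if d.contains o then d else d.insert o []
     d'.modify o [] f) = d.modify o [] f := by
  by_cases h : d.contains o = true
  · simp [h]
  · simp only [Bool.not_eq_true] at h
    simp [h, PySem.Dict.modify, PySem.Dict.getD_insert_self, PySem.Dict.insert_insert_self,
          PySem.Dict.getD_of_not_contains _ _ h]

-- A's nested grouping loop is the modify-append fold over the flattened triples.
theorem pv_dict_eq (configurations : List (String × List (String × String))) :
    (configurations.foldl (fun configs bc =>
        bc.2.foldl (fun configs ov =>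
          let configs := if configs.contains ov.1 then configs else configs.insert ov.1 []
          configs.modify ov.1 [] (fun l => l ++ [(bc.1, ov.2)])) configs)
      PySem.Dict.empty)
    = (pvTriples configurations).foldl (fun d p => d.modify p.1 [] (fun l => l ++ [p.2]))
        PySem.Dict.empty := by
  rw [pvTriples, List.foldl_flatMap]
  apply PySem.List.foldl_congr_mem
  intro d bc _
  rw [List.foldl_map]
  apply PySem.List.foldl_congr_mem
  intro d ov _
  exact pv_step_eq d ov.1 (fun l => l ++ [(bc.1, ov.2)])

theorem gather_configurations_eq_alt (configurations : List (String × List (String × String))) :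
    gather_configurations configurations = gather_configurations_alt configurations := by
  unfold gather_configurations
  dsimp only
  rw [pv_dict_eq]
  set triples := pvTriples configurations with htr
  set S := PySem.List.sorted triples (fun t => t.1) with hS
  -- the two group functions agree (stability of the sort)
  have hgroups : pvGroup S = pvGroup triples := by
    funext o
    simp only [pvGroup, hS, pv_sorted_filter]
  -- B's sweep result
  have hSpair : (S.map (fun t => t.1)).Pairwise (· ≤ ·) := PySem.List.sorted_map_key_pairwise _ _
  set ksB := PySem.Set.ofList (S.map (fun t => t.1)) with hksB
  have hout : S.foldl pvStep [] = ksB.map (pvGroup triples) := by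
    rw [pv_sweep_eq S hSpair, hgroups]
  have hksBnodup : ksB.Nodup := PySem.Set.nodup_ofList _
  have hksBle : ksB.Pairwise (· ≤ ·) := hSpair.sublist (pv_ofList_sublist _)
  have hksBlt : ksB.Pairwise (· < ·) :=
    (hksBle.and hksBnodup).imp (fun h => lt_of_le_of_ne h.1 h.2)
  -- B's dict(out) round trip is the identity
  have houtkeys : (ksB.map (pvGroup triples)).map (fun p => p.1) = ksB := by
    rw [List.map_map]
    have : ((fun p : String × List (String × String) => p.1) ∘ pvGroup triples) = id := by
      funext o; rfl
    rw [this, List.map_id]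
  have hB : gather_configurations_alt configurations = ksB.map (pvGroup triples) := by
    unfold gather_configurations_alt
    rw [← htr, ← hS]
    show (PySem.Dict.ofList (S.foldl pvStep [])).items = _
    rw [hout]
    have hfresh : ∀ a ∈ ksB.map (pvGroup triples),
        (PySem.Dict.empty : PySem.Dict String (List (String × String))).contains a.1 = false := by
      intro a _; simp [pysem]
    have hnd : ((ksB.map (pvGroup triples)).map (fun p => p.1)).Nodup := by
      rw [houtkeys]; exact hksBnodup
    show ((ksB.map (pvGroup triples)).foldl (fun d p => d.insert p.1 p.2) PySem.Dict.empty).items = _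
    have := PySem.Dict.items_foldl_insert_fresh (ksB.map (pvGroup triples))
      (fun p => p.1) (fun p => p.2) PySem.Dict.empty hfresh hnd
    simpa using this
  rw [hB]
  -- A's dict, characterised
  set dA : PySem.Dict String (List (String × String)) :=
    triples.foldl (fun d p => d.modify p.1 [] (fun l => l ++ [p.2])) PySem.Dict.empty with hdA
  have hAkeys : dA.keys = PySem.Set.ofList (triples.map (fun t => t.1)) := by
    rw [hdA, PySem.Dict.keys_foldl_modify_key triples (fun t => t.1) [] (fun _ t l => l ++ [t.2])]
    simp [PySem.Set.update, PySem.Set.ofList_eq_foldl, PySem.Dict.keys_empty]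
  have hAnodup : dA.keys.Nodup := by rw [hAkeys]; exact PySem.Set.nodup_ofList _
  have hAgetD : ∀ o : String, dA.getD o [] = (pvGroup triples o).2 := by
    intro o
    rw [hdA, PySem.Dict.getD_foldl_modify_append, PySem.Dict.getD_empty]
    simp [pvGroup]
  have hAitems : dA.items = dA.keys.map (pvGroup triples) := by
    rw [PySem.Dict.items_eq_map_keys dA hAnodup []]
    exact List.map_congr_left (fun o _ => by rw [hAgetD o]; rfl)
  -- A's final sort returns exactly B's strictly key-increasing list
  refine PySem.List.sorted_eq_of_perm_of_pairwise_lt _ _ _ ?_ ?_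
  · rw [hAitems, hAkeys]
    refine List.Perm.map _ ?_
    rw [List.perm_ext_iff_of_nodup hksBnodup (PySem.Set.nodup_ofList _)]
    intro o
    rw [hksB, PySem.Set.mem_ofList, PySem.Set.mem_ofList]
    constructor
    · intro h
      rcases List.mem_map.mp h with ⟨z, hz, hz'⟩
      exact List.mem_map.mpr ⟨z, (PySem.List.mem_sorted _ _ _ _).mp (hS ▸ hz), hz'⟩
    · intro h
      rcases List.mem_map.mp h with ⟨z, hz, hz'⟩
      exact List.mem_map.mpr ⟨z, hS ▸ (PySem.List.mem_sorted triples (fun t => t.1) false z).mpr hz, hz'⟩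
  · exact List.Pairwise.map _ (fun a b h => h) hksBlt

-- ===== VERDICT (by name: the statement is the Claim_ definition above) =====
theorem gather_configurations_spec : Claim_equal_gather_configurations := by
  intro configurations _
  exact gather_configurations_eq_alt configurations
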